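-- pv_equiv track=rewrite | github.com/npxhuy/MERFISH_probeDesign | scripts/codebook_list_new.py | generate_codewords
-- ===== SOURCE A (Python) =====
-- from itertools import combinations
--
-- def hamming_distance(s1, s2):
--     return sum(c1 != c2 for c1, c2 in zip(s1, s2))
--
-- def generate_codewords(length):
--     # Generate all possible combinations of indices for placing four 1s
--     indices = list(range(length))
--     codewords = []
--     for comb in combinations(indices, 4):
--         codeword = ['0'] * length
--         prev_index = None
--         for index in comb:
--             # Ensure no more than three consecutive 1s
--             if prev_index is not None and index == prev_index + 1:
--                 break
--             codeword[index] = '1'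
--             prev_index = index
--         else:  # This block executes if the loop does not break
--             codeword_str = ''.join(codeword)
--             # Check Hamming distance
--             valid = True
--             for existing_codeword in codewords:
--                 if hamming_distance(codeword_str, existing_codeword) < 4:
--                     valid = False
--                     break
--             if valid:
--                 codewords.append(codeword_str)
--     return codewords
-- ===== SOURCE B (Python) =====
-- from itertools import combinations
--
-- def generate_codewords(length):
--     codewords = []
--     seen = set()  # 3-subsets of accepted index quadruples
--     for comb in combinations(range(length), 4):
--         if any(b == a + 1 for a, b in zip(comb, comb[1:])):
--             continue
--         triples = list(combinations(comb, 3))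
--         if any(t in seen for t in triples):
--             continue
--         seen.update(triples)
--         codewords.append(''.join('1' if i in comb else '0' for i in range(length)))
--     return codewords
-- ===== Notes on version B (the rewrite author's own statement) =====
-- stated objective: alternative
-- what changed: B drops A's inner scan that recomputes a Hamming distance against every previously accepted codeword: since every codeword has weight four, two codewords conflict (distance below four) exactly when they share three one-positions, so B keeps a set of the three-element subsets of the accepted index quadruples and rejects a candidate exactly when one of its triples is already in that set.
import Mathlib
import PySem

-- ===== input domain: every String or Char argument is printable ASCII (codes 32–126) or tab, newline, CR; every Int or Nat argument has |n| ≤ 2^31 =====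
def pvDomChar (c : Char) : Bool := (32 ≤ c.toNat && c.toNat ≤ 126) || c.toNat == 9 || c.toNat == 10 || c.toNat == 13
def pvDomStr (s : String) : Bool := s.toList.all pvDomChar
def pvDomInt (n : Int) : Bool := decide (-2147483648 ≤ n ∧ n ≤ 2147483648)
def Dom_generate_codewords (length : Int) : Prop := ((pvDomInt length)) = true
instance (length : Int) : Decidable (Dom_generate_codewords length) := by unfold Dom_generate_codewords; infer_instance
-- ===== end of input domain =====

-- B replaces A's inner scan of all accepted codewords (one Hamming distance per accepted
-- codeword) by a set of the three-element subsets of the accepted index quadruples: a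
-- candidate conflicts iff it shares such a triple (objective: alternative acceptance test).

-- ===== PORT A =====

-- itertools.combinations(xs, k) in lexicographic order (library helper, shared by both ports)
def pvCombos {α : Type} : Nat → List α → List (List α)
  | 0, _ => [[]]
  | _ + 1, [] => []
  | k + 1, x :: rest => (pvCombos k rest).map (x :: ·) ++ pvCombos (k + 1) rest

def hamming_distance (s1 s2 : String) : Int :=
  ((s1.toList.zip s2.toList).countP (fun p => p.1 != p.2) : Int)

-- the inner `for index in comb` loop with its break (none = break, i.e. skip this codeword)
def pvFill (comb : List Int) (codeword : List Char) (prev : Option Int) : Option (List Char) :=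
  match comb with
  | [] => some codeword
  | i :: rest =>
    match prev with
    | some p => if i = p + 1 then none else pvFill rest (codeword.set i.toNat '1') (some i)
    | none => pvFill rest (codeword.set i.toNat '1') (some i)

-- the `for existing_codeword in codewords` validity scan with its break
def pvValid (s : String) (codewords : List String) : Bool :=
  match codewords with
  | [] => true
  | e :: rest => if hamming_distance s e < 4 then false else pvValid s rest

def generate_codewords (length : Int) : List String :=
  (pvCombos 4 (PySem.List.pyRange 0 length 1)).foldl (fun codewords comb =>
    match pvFill comb (List.replicate length.toNat '0') none with
    | none => codewords
    | some codeword =>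
      let codeword_str := String.ofList codeword
      if pvValid codeword_str codewords then codewords ++ [codeword_str] else codewords) []

-- ===== PORT B =====

def pvHasAdj (comb : List Int) : Bool :=
  (comb.zip (comb.drop 1)).any (fun p => p.2 == p.1 + 1)

def pvMask (length : Int) (comb : List Int) : String :=
  String.ofList ((PySem.List.pyRange 0 length 1).map (fun i => if i ∈ comb then '1' else '0'))

def generate_codewords_alt (length : Int) : List String :=
  ((pvCombos 4 (PySem.List.pyRange 0 length 1)).foldl
    (fun (st : List String × PySem.Set (List Int)) comb =>
      if pvHasAdj comb then st
      else
        let triples := pvCombos 3 comb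
        if triples.any (fun t => PySem.Set.contains st.2 t) then st
        else (st.1 ++ [pvMask length comb], PySem.Set.update st.2 triples))
    ([], PySem.Set.empty)).1

-- ===== PRECONDITION & SPEC =====
def Spec_generate_codewords (length : Int) (out : List String) : Prop := out = generate_codewords_alt length
instance (length : Int) (out : List String) : Decidable (Spec_generate_codewords length out) := by unfold Spec_generate_codewords; infer_instance

-- ===== CLAIM (what is proved, stated in full; the proofs are below) =====
def Claim_equal_generate_codewords : Prop := ∀ (length : Int), Dom_generate_codewords length → Spec_generate_codewords length (generate_codewords length)

-- ===== LEMMAS AND PROOFS =====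

theorem mem_pvCombos {α : Type} : ∀ (xs : List α) (k : Nat) (t : List α),
    t ∈ pvCombos k xs ↔ t.Sublist xs ∧ t.length = k := by
  intro xs
  induction xs with
  | nil => intro k t; cases k <;> simp [pvCombos] <;> rintro rfl <;> simp
  | cons x rest ih =>
    intro k t
    cases k with
    | zero =>
      simp only [pvCombos, List.mem_singleton]
      constructor
      · rintro rfl; exact ⟨List.nil_sublist _, rfl⟩
      · rintro ⟨h, hl⟩; exact List.eq_nil_of_length_eq_zero hl
    | succ k =>
      simp only [pvCombos, List.mem_append, List.mem_map, ih]
      constructor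
      · rintro (⟨r, ⟨hr, hl⟩, rfl⟩ | ⟨h, hl⟩)
        · exact ⟨List.Sublist.cons₂ x hr, by simp [hl]⟩
        · exact ⟨List.Sublist.cons x h, hl⟩
      · rintro ⟨h, hl⟩
        rcases List.sublist_cons_iff.mp h with h' | ⟨r, rfl, hr⟩
        · exact Or.inr ⟨h', hl⟩
        · exact Or.inl ⟨r, ⟨hr, by simpa using hl⟩, rfl⟩

theorem sorted_subset_sublist : ∀ (l₂ l₁ : List Int), l₁.Pairwise (· < ·) → l₂.Pairwise (· < ·) →
    l₁ ⊆ l₂ → l₁.Sublist l₂ := by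
  intro l₂
  induction l₂ with
  | nil => intro l₁ _ _ h; simpa using List.subset_nil.mp h
  | cons b t ih =>
    intro l₁ h1 h2 hsub
    cases l₁ with
    | nil => simp
    | cons a s =>
      rcases List.pairwise_cons.mp h1 with ⟨ha, hs⟩
      rcases List.pairwise_cons.mp h2 with ⟨hb, ht⟩
      by_cases hab : a = b
      · subst hab
        refine List.Sublist.cons₂ a (ih s hs ht ?_)
        intro x hx
        have hxm : x ∈ a :: t := hsub (List.mem_cons_of_mem a hx)
        rcases List.mem_cons.mp hxm with rfl | hxt
        · exact absurd (ha x hx) (lt_irrefl x)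
        · exact hxt
      · have hat : a ∈ t := by
          rcases List.mem_cons.mp (hsub List.mem_cons_self) with rfl | h
          · exact absurd rfl hab
          · exact h
        have hba : b < a := hb a hat
        refine List.Sublist.cons b (ih (a :: s) h1 ht ?_)
        intro x hx
        rcases List.mem_cons.mp (hsub hx) with rfl | h
        · exfalso
          rcases List.mem_cons.mp hx with rfl | hxs
          · exact absurd rfl hab
          · exact absurd (lt_trans hba (ha x hxs)) (lt_irrefl x)
        · exact h

theorem pvHasAdj_nil : pvHasAdj [] = false := rfl
theorem pvHasAdj_single (i : Int) : pvHasAdj [i] = false := rfl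
theorem pvHasAdj_cons (i j : Int) (r : List Int) :
    pvHasAdj (i :: j :: r) = ((j == i + 1) || pvHasAdj (j :: r)) := by
  simp [pvHasAdj, List.zip]

theorem pvFill_some : ∀ (comb : List Int) (cw : List Char) (p : Int),
    pvFill comb cw (some p) =
      if pvHasAdj (p :: comb) then none
      else some (comb.foldl (fun c i => c.set i.toNat '1') cw) := by
  intro comb
  induction comb with
  | nil => intro cw p; simp [pvFill, pvHasAdj_single]
  | cons i rest ih =>
    intro cw p
    rw [pvHasAdj_cons]
    by_cases h : i = p + 1
    · simp [pvFill, h]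
    · have hbe : (i == p + 1) = false := by simp [h]
      simp only [pvFill, h, if_false, ih, hbe, Bool.false_or, List.foldl_cons]

theorem pvFill_none : ∀ (comb : List Int) (cw : List Char),
    pvFill comb cw none =
      if pvHasAdj comb then none
      else some (comb.foldl (fun c i => c.set i.toNat '1') cw) := by
  intro comb cw
  cases comb with
  | nil => simp [pvFill, pvHasAdj_nil]
  | cons i rest => simp only [pvFill, pvFill_some, List.foldl_cons]

theorem foldl_set_getElem? : ∀ (comb : List Int) (base : List Char) (j : Nat),
    (∀ i ∈ comb, 0 ≤ i ∧ i.toNat < base.length) →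
    (comb.foldl (fun c i => c.set i.toNat '1') base)[j]? =
      if (j : Int) ∈ comb then some '1' else base[j]? := by
  intro comb
  induction comb with
  | nil => intro base j _; simp
  | cons i rest ih =>
    intro base j hb
    have hi := hb i List.mem_cons_self
    have hrest : ∀ x ∈ rest, 0 ≤ x ∧ x.toNat < (base.set i.toNat '1').length := by
      intro x hx; simpa using hb x (List.mem_cons_of_mem i hx)
    simp only [List.foldl_cons, ih _ _ hrest, List.mem_cons]
    by_cases hjr : (j : Int) ∈ rest
    · simp [hjr]
    · by_cases hji : (j : Int) = i
      · have : j = i.toNat := by omega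
        subst this
        simp [hji, hi.2]
      · have hne : i.toNat ≠ j := by omega
        simp [hjr, hji, hne]

theorem fill_mask (n : Int) (comb : List Int) (h : ∀ i ∈ comb, 0 ≤ i ∧ i < n) :
    comb.foldl (fun c i => c.set i.toNat '1') (List.replicate n.toNat '0') =
      (PySem.List.pyRange 0 n 1).map (fun i => if i ∈ comb then '1' else '0') := by
  apply List.ext_getElem?
  intro j
  have hb : ∀ i ∈ comb, 0 ≤ i ∧ i.toNat < (List.replicate n.toNat '0').length := by
    intro i hi; have := h i hi
    refine ⟨this.1, ?_⟩
    simp only [List.length_replicate]; omega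
  rw [foldl_set_getElem? comb _ j hb]
  rw [PySem.List.pyRange_one]
  simp only [List.map_map, List.getElem?_map, List.getElem?_replicate]
  by_cases hj : j < (n - 0).toNat
  · have hj' : j < n.toNat := by omega
    rw [List.getElem?_range hj]
    simp only [Option.map_some, Function.comp_apply, zero_add, hj', if_true]
    split_ifs <;> rfl
  · have h1 : ¬ j < n.toNat := by omega
    have h2 : (j : Int) ∉ comb := by
      intro hm; have := h _ hm; omega
    have hr : (List.range (n - 0).toNat)[j]? = none := by
      rw [List.getElem?_eq_none_iff]; simpa using by omega
    simp [h1, h2, hr]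

theorem filter_length_card (c e : List Int) (hc : c.Nodup) :
    (c.filter (fun i => decide (i ∈ e))).length = (c.toFinset ∩ e.toFinset).card := by
  have h1 : (c.filter (fun i => decide (i ∈ e))).Nodup := hc.filter _
  rw [← List.toFinset_card_of_nodup h1, List.toFinset_filter]
  congr 1
  ext x
  simp

theorem countP_xor (Rl c e : List Int) (hR : Rl.Nodup) (hc : c.Nodup) (he : e.Nodup)
    (hcR : c ⊆ Rl) (heR : e ⊆ Rl) :
    Rl.countP (fun i => decide (i ∈ c) != decide (i ∈ e)) =
      (c.length - (c.toFinset ∩ e.toFinset).card) + (e.length - (e.toFinset ∩ c.toFinset).card) := by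
  rw [List.countP_eq_length_filter]
  have h1 : (Rl.filter (fun i => decide (i ∈ c) != decide (i ∈ e))).Nodup := hR.filter _
  rw [← List.toFinset_card_of_nodup h1, List.toFinset_filter]
  have hset : Rl.toFinset.filter (fun i => (decide (i ∈ c) != decide (i ∈ e)) = true) =
      (c.toFinset \ e.toFinset) ∪ (e.toFinset \ c.toFinset) := by
    ext x
    simp only [Finset.mem_filter, List.mem_toFinset, Finset.mem_union, Finset.mem_sdiff,
      bne_iff_ne, ne_eq, decide_eq_decide]
    constructor
    · rintro ⟨_, hx⟩; tauto
    · rintro (⟨h1, h2⟩ | ⟨h1, h2⟩)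
      · exact ⟨hcR h1, by tauto⟩
      · exact ⟨heR h1, by tauto⟩
  rw [hset, Finset.card_union_of_disjoint disjoint_sdiff_sdiff]
  have hc1 := Finset.card_sdiff_add_card_inter c.toFinset e.toFinset
  have hc2 := Finset.card_sdiff_add_card_inter e.toFinset c.toFinset
  rw [List.toFinset_card_of_nodup hc] at hc1
  rw [List.toFinset_card_of_nodup he] at hc2
  omega

theorem shared_triple_iff (c e : List Int) (hc : c.Pairwise (· < ·)) (he : e.Pairwise (· < ·)) :
    (∃ t : List Int, t.Sublist c ∧ t.length = 3 ∧ t.Sublist e) ↔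
      3 ≤ (c.toFinset ∩ e.toFinset).card := by
  constructor
  · rintro ⟨t, htc, htl, hte⟩
    have htp : t.Pairwise (· < ·) := hc.sublist htc
    have hnd : t.Nodup := htp.imp ne_of_lt
    have hsub : t.toFinset ⊆ c.toFinset ∩ e.toFinset := by
      intro x hx
      rw [List.mem_toFinset] at hx
      rw [Finset.mem_inter, List.mem_toFinset, List.mem_toFinset]
      exact ⟨htc.subset hx, hte.subset hx⟩
    calc 3 = t.toFinset.card := by rw [List.toFinset_card_of_nodup hnd, htl]
    _ ≤ _ := Finset.card_le_card hsub
  · intro hK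
    have hcnd : c.Nodup := hc.imp ne_of_lt
    have hfc : (c.filter (fun i => decide (i ∈ e))).Sublist c := List.filter_sublist (l := c)
    have hfp : (c.filter (fun i => decide (i ∈ e))).Pairwise (· < ·) := hc.sublist hfc
    have hfe : (c.filter (fun i => decide (i ∈ e))).Sublist e := by
      apply sorted_subset_sublist e _ hfp he
      intro x hx
      have := List.of_mem_filter hx
      simpa using this
    have hlen : (c.filter (fun i => decide (i ∈ e))).length = (c.toFinset ∩ e.toFinset).card :=
      filter_length_card c e hcnd
    refine ⟨(c.filter (fun i => decide (i ∈ e))).take 3,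
      (List.take_sublist _ _).trans hfc, ?_, (List.take_sublist _ _).trans hfe⟩
    rw [List.length_take]
    omega

theorem pvValid_iff (s : String) : ∀ (l : List String),
    pvValid s l = true ↔ ∀ e ∈ l, ¬ hamming_distance s e < 4 := by
  intro l
  induction l with
  | nil => simp [pvValid]
  | cons e rest ih =>
    simp only [pvValid]
    by_cases h : hamming_distance s e < 4
    · simp only [h, if_true]
      constructor
      · intro hf; exact absurd hf (by simp)
      · intro hall; exact absurd h (hall e List.mem_cons_self)
    · simp only [h, if_false]
      rw [ih]
      constructor
      · intro hall x hx
        rcases List.mem_cons.mp hx with rfl | hx'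
        · exact h
        · exact hall x hx'
      · intro hall x hx; exact hall x (List.mem_cons_of_mem _ hx)

theorem pv_contains_iff {α : Type} [BEq α] [LawfulBEq α] (s : PySem.Set α) (x : α) :
    PySem.Set.contains s x = true ↔ x ∈ s := by
  simp [PySem.Set.contains]

theorem pv_mem_update {α : Type} [BEq α] [LawfulBEq α] : ∀ (l : List α) (s : PySem.Set α) (t : α),
    t ∈ PySem.Set.update s l ↔ t ∈ s ∨ t ∈ l := by
  intro l
  induction l with
  | nil => intro s t; simp [PySem.Set.update]
  | cons x rest ih =>
    intro s t
    have : PySem.Set.update s (x :: rest) = PySem.Set.update (PySem.Set.add s x) rest := by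
      simp [PySem.Set.update]
    rw [this, ih, PySem.Set.mem_add]
    simp [or_assoc]

theorem hamming_mask (n : Int) (c e : List Int)
    (hcR : c ⊆ PySem.List.pyRange 0 n 1) (heR : e ⊆ PySem.List.pyRange 0 n 1)
    (hc : c.Pairwise (· < ·)) (he : e.Pairwise (· < ·))
    (hc4 : c.length = 4) (he4 : e.length = 4) :
    (hamming_distance (pvMask n c) (pvMask n e) < 4) ↔ 3 ≤ (c.toFinset ∩ e.toFinset).card := by
  have hR : (PySem.List.pyRange 0 n 1).Nodup := PySem.List.nodup_pyRange_one 0 n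
  have hcnd : c.Nodup := hc.imp ne_of_lt
  have hend : e.Nodup := he.imp ne_of_lt
  have htl : ∀ (l : List Int), (pvMask n l).toList =
      (PySem.List.pyRange 0 n 1).map (fun i => if i ∈ l then '1' else '0') := by
    intro l; simp [pvMask]
  unfold hamming_distance
  rw [htl, htl, List.zip_map', List.countP_map]
  have hcong : (PySem.List.pyRange 0 n 1).countP
        ((fun p : Char × Char => p.1 != p.2) ∘
          (fun i => (if i ∈ c then '1' else '0', if i ∈ e then '1' else '0'))) =
      (PySem.List.pyRange 0 n 1).countP (fun i => decide (i ∈ c) != decide (i ∈ e)) := by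
    apply List.countP_congr
    intro i _
    by_cases h1 : i ∈ c <;> by_cases h2 : i ∈ e <;> simp [h1, h2]
  rw [hcong, countP_xor _ c e hR hcnd hend hcR heR, hc4, he4, Finset.inter_comm e.toFinset]
  have hK4 : (c.toFinset ∩ e.toFinset).card ≤ 4 := by
    calc (c.toFinset ∩ e.toFinset).card ≤ c.toFinset.card :=
          Finset.card_le_card Finset.inter_subset_left
    _ = 4 := by rw [List.toFinset_card_of_nodup hcnd, hc4]
  omega

-- the per-comb invariant: a 4-element sublist of range(n)
def pvGood (n : Int) (c : List Int) : Prop :=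
  c.Sublist (PySem.List.pyRange 0 n 1) ∧ c.length = 4

theorem pvGood_pairwise {n : Int} {c : List Int} (h : pvGood n c) : c.Pairwise (· < ·) :=
  (PySem.List.pairwise_lt_pyRange_one (a := 0) (b := n)).sublist h.1

theorem pvGood_bound {n : Int} {c : List Int} (h : pvGood n c) : ∀ i ∈ c, 0 ≤ i ∧ i < n := by
  intro i hi
  have := h.1.subset hi
  rw [PySem.List.mem_pyRange_one] at this
  omega

theorem main_fold (n : Int) : ∀ (cs : List (List Int)) (acc : List (List Int))
    (seen : PySem.Set (List Int)),
    (∀ c ∈ cs, pvGood n c) → (∀ c ∈ acc, pvGood n c) →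
    (∀ t : List Int, PySem.Set.contains seen t = true ↔ ∃ c ∈ acc, t.Sublist c ∧ t.length = 3) →
    cs.foldl (fun codewords comb =>
        match pvFill comb (List.replicate n.toNat '0') none with
        | none => codewords
        | some codeword =>
          let codeword_str := String.ofList codeword
          if pvValid codeword_str codewords then codewords ++ [codeword_str] else codewords)
      (acc.map (pvMask n)) =
    (cs.foldl (fun (st : List String × PySem.Set (List Int)) comb =>
        if pvHasAdj comb then st
        else
          let triples := pvCombos 3 comb
          if triples.any (fun t => PySem.Set.contains st.2 t) then st
          else (st.1 ++ [pvMask n comb], PySem.Set.update st.2 triples))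
      (acc.map (pvMask n), seen)).1 := by
  intro cs
  induction cs with
  | nil => intros; simp
  | cons comb rest ih =>
    intro acc seen hcs hacc hseen
    have hg := hcs comb List.mem_cons_self
    have hrest : ∀ c ∈ rest, pvGood n c := fun c hc => hcs c (List.mem_cons_of_mem _ hc)
    have hcp : comb.Pairwise (· < ·) := pvGood_pairwise hg
    have hbound : ∀ i ∈ comb, 0 ≤ i ∧ i < n := pvGood_bound hg
    simp only [List.foldl_cons]
    rw [pvFill_none, fill_mask n comb hbound]
    have hms : String.ofList ((PySem.List.pyRange 0 n 1).map
        (fun i => if i ∈ comb then '1' else '0')) = pvMask n comb := rfl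
    rcases hadj : pvHasAdj comb with _ | _
    · -- no adjacent pair: the candidate string is built; compare acceptance tests
      have hkey : pvValid (pvMask n comb) (acc.map (pvMask n)) =
          !((pvCombos 3 comb).any (fun t => PySem.Set.contains seen t)) := by
        rcases hany : (pvCombos 3 comb).any (fun t => PySem.Set.contains seen t) with _ | _
        · rw [List.any_eq_false] at hany
          simp only [Bool.not_false]
          rw [pvValid_iff]
          intro s hs
          rw [List.mem_map] at hs
          rcases hs with ⟨a, ha, rfl⟩
          have hga := hacc a ha
          rw [hamming_mask n comb a (hg.1.subset) (hga.1.subset) hcp (pvGood_pairwise hga)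
            hg.2 hga.2]
          rw [← shared_triple_iff comb a hcp (pvGood_pairwise hga)]
          rintro ⟨t, htc, htl, hta⟩
          have hts : PySem.Set.contains seen t = true :=
            (hseen t).mpr ⟨a, ha, hta, htl⟩
          exact absurd hts (by simpa using hany t ((mem_pvCombos comb 3 t).mpr ⟨htc, htl⟩))
        · rw [List.any_eq_true] at hany
          rcases hany with ⟨t, htmem, hts⟩
          rcases (mem_pvCombos comb 3 t).mp htmem with ⟨htc, htl⟩
          rcases (hseen t).mp hts with ⟨a, ha, hta, _⟩
          simp only [Bool.not_true]
          rcases hval : pvValid (pvMask n comb) (acc.map (pvMask n)) with _ | _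
          · rfl
          · exfalso
            rw [pvValid_iff] at hval
            have hga := hacc a ha
            have := hval (pvMask n a) (List.mem_map_of_mem ha)
            rw [hamming_mask n comb a (hg.1.subset) (hga.1.subset) hcp (pvGood_pairwise hga)
              hg.2 hga.2] at this
            rw [← shared_triple_iff comb a hcp (pvGood_pairwise hga)] at this
            exact this ⟨t, htc, htl, hta⟩
      rcases hany : (pvCombos 3 comb).any (fun t => PySem.Set.contains seen t) with _ | _
      · -- no conflict: both sides append
        rw [hany, Bool.not_false] at hkey
        have hacc' : ∀ c ∈ acc ++ [comb], pvGood n c := by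
          intro c hc
          rcases List.mem_append.mp hc with h | h
          · exact hacc c h
          · rw [List.mem_singleton] at h; subst h; exact hg
        have hseen' : ∀ t : List Int,
            PySem.Set.contains (PySem.Set.update seen (pvCombos 3 comb)) t = true ↔
              ∃ c ∈ acc ++ [comb], t.Sublist c ∧ t.length = 3 := by
          intro t
          rw [pv_contains_iff, pv_mem_update, ← pv_contains_iff, hseen, mem_pvCombos]
          constructor
          · rintro (⟨a, ha, h1, h2⟩ | ⟨h1, h2⟩)
            · exact ⟨a, List.mem_append_left _ ha, h1, h2⟩
            · exact ⟨comb, List.mem_append_right _ (List.mem_singleton.mpr rfl), h1, h2⟩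
          · rintro ⟨a, ha, h1, h2⟩
            rcases List.mem_append.mp ha with h | h
            · exact Or.inl ⟨a, h, h1, h2⟩
            · rw [List.mem_singleton] at h; subst h; exact Or.inr ⟨h1, h2⟩
        have hgoal := ih (acc ++ [comb]) (PySem.Set.update seen (pvCombos 3 comb)) hrest hacc' hseen'
        rw [List.map_append, List.map_singleton] at hgoal
        simp only [Bool.false_eq_true, reduceIte, hms, hkey]
        exact hgoal
      · -- conflict: both sides skip
        rw [hany, Bool.not_true] at hkey
        have hgoal := ih acc seen hrest hacc hseen
        simp only [Bool.false_eq_true, reduceIte, hms, hkey]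
        exact hgoal
    · -- adjacent pair: both sides skip
      simp only [reduceIte]
      exact ih acc seen hrest hacc hseen

-- ===== VERDICT (by name: the statement is the Claim_ definition above) =====
theorem generate_codewords_spec : Claim_equal_generate_codewords := by
  intro n _
  unfold Spec_generate_codewords generate_codewords generate_codewords_alt
  have hgood : ∀ c ∈ pvCombos 4 (PySem.List.pyRange 0 n 1), pvGood n c := by
    intro c hc
    rcases (mem_pvCombos _ 4 c).mp hc with ⟨h1, h2⟩
    exact ⟨h1, h2⟩
  have hempty : ∀ t : List Int,
      PySem.Set.contains (PySem.Set.empty : PySem.Set (List Int)) t = true ↔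
        ∃ c ∈ ([] : List (List Int)), t.Sublist c ∧ t.length = 3 := by
    intro t
    simp [PySem.Set.contains, PySem.Set.empty]
  have := main_fold n (pvCombos 4 (PySem.List.pyRange 0 n 1)) [] PySem.Set.empty hgood
    (by intro c hc; cases hc) hempty
  simpa using this
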